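-- pv_equiv track=rewrite | github.com/Hotmericano/Algorithm | 백준/Silver/32298. 등차수열을 만들어요/등차수열을 만들어요.py | solve
-- ===== SOURCE A (Python) =====
-- def is_prime(n):
--     if n <= 1:
--         return False
--     if n <= 3:
--         return True
--     if n % 2 == 0 or n % 3 == 0:
--         return False
--     i = 5
--     while i * i <= n:
--         if n % i == 0 or n % (i + 2) == 0:
--             return False
--         i += 6
--     return True
--
-- def solve(N, M):
--     first = 1
--
--     while True:
--         sequence = [first + i * M for i in range(N)]
--         prime_check = 0
--
--         if max(sequence) > 2000000:
--             return [-1]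
--
--         for num in sequence:
--             if (is_prime(num)):
--                 prime_check = 1
--                 break
--         if (prime_check == 0):
--             return sequence
--
--         first += 1
-- ===== SOURCE B (Python) =====
-- def solve(N, M):
--     LIMIT = 2000000
--     # Sieve of Eratosthenes: composite[v] truthy once v is known composite.
--     sieve = bytearray([1]) * (LIMIT + 1)
--     sieve[0] = 0
--     sieve[1] = 0
--     p = 2
--     while p * p <= LIMIT:
--         if sieve[p]:
--             for q in range(p * p, LIMIT + 1, p):
--                 sieve[q] = 0
--         p += 1
--     tail = (N - 1) * M if M > 0 else 0
--     for first in range(1, LIMIT - tail + 1):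
--         if all(t < 2 or not sieve[t] for t in (first + i * M for i in range(N))):
--             return [first + i * M for i in range(N)]
--     return [-1]
-- ===== Notes on version B (the rewrite author's own statement) =====
-- stated objective: alternative
-- what changed: B replaces A's per-term trial-division primality tests (re-run for every candidate sequence) by a sieve of Eratosthenes over [0,2000000] built once, then scans candidate starts first = 1,2,... over a closed-form range with O(1) sieve lookups per term.
-- outside the precondition, e.g. on solve(0, 5): A raises ValueError, B returns []
import Mathlib
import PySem

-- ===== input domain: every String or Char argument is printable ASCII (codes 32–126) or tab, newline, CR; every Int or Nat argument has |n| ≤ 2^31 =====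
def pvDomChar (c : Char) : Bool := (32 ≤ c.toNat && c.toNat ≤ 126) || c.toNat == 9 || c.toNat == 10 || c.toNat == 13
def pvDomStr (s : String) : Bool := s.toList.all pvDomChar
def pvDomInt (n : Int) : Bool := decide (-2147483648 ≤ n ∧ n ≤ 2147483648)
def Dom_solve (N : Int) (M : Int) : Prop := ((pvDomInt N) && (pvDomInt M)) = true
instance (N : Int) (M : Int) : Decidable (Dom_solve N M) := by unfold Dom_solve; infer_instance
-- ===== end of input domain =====

-- B replaces A's per-candidate trial-division primality testing by one sieve of Eratosthenes
-- over [0, 2000000] built once, then a single scan of the candidate starts with sieve lookups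
-- (objective: alternative). Proved equal on Pre_ (1 ≤ N): for N ≤ 0 A's max([]) raises ValueError.


-- ===== PORT A =====
-- while i*i <= n: check divisors i and i+2, i += 6.  Fuel only makes the loop structural;
-- within its calls (fuel = n.toNat, i = 5) it never runs out (proved below).
def isPrimeLoopA (n : Int) (i : Int) : Nat → Bool
  | 0 => true
  | fuel + 1 =>
    if i * i ≤ n then
      if PySem.Int.mod n i == 0 || PySem.Int.mod n (i + 2) == 0 then false
      else isPrimeLoopA n (i + 6) fuel
    else true

def is_prime (n : Int) : Bool :=
  if n ≤ 1 then false
  else if n ≤ 3 then true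
  else if PySem.Int.mod n 2 == 0 || PySem.Int.mod n 3 == 0 then false
  else isPrimeLoopA n 5 n.toNat

-- while True: build sequence, return [-1] if max > 2000000, scan for a prime, else return.
-- Fuel 2000001 only makes the loop structural: max(sequence) ≥ first, so the loop body
-- returns by first = 2000001 at the latest and the fuel never runs out (proved below).
def solveLoopA (N : Int) (M : Int) (first : Int) : Nat → List Int
  | 0 => [-1]
  | fuel + 1 =>
    let seq := (PySem.List.pyRange 0 N 1).map (fun i => first + i * M)
    match PySem.List.max? seq (fun y => y) with
    | none => [-1]   -- Python raises ValueError here (empty sequence); excluded by Pre_solve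
    | some mx =>
      if 2000000 < mx then [-1]
      else if seq.any (fun num => is_prime num) then solveLoopA N M (first + 1) fuel
      else seq

def solve (N : Int) (M : Int) : List Int := solveLoopA N M 1 2000001

-- ===== PORT B =====
-- for q in range(p*p, LIMIT+1, p): sieve[q] = 0.  Indices q ≥ p*p ≥ 0, so .toNat is exact.
def markMultiples (limit p : Int) (s : Array Bool) : Array Bool :=
  (PySem.List.pyRange (p * p) (limit + 1) p).foldl (fun s q => s.set! q.toNat false) s

-- while p * p <= LIMIT: if sieve[p]: mark multiples; p += 1.  Fuel only makes the loop
-- structural; with fuel 2000000 from p = 2 it never runs out (proved below).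
def sieveLoop (limit p : Int) (s : Array Bool) : Nat → Array Bool
  | 0 => s
  | fuel + 1 =>
    if p * p ≤ limit then
      sieveLoop limit (p + 1) (if s[p.toNat]! then markMultiples limit p s else s) fuel
    else s

-- sieve = bytearray([1]) * (LIMIT + 1); sieve[0] = sieve[1] = 0; then the marking loop
def buildSieve : Array Bool :=
  sieveLoop 2000000 2 (((Array.replicate 2000001 true).set! 0 false).set! 1 false) 2000000

-- for first in range(1, LIMIT - tail + 1): return the sequence if every term t has
-- t < 2 or not sieve[t] (t ≤ LIMIT inside the range, so the lookup is exact).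
def scanFirsts (N M : Int) (sieve : Array Bool) : List Int → List Int
  | [] => [-1]
  | first :: rest =>
    if (PySem.List.pyRange 0 N 1).all
        (fun i => decide (first + i * M < 2) || !(sieve[(first + i * M).toNat]!)) then
      (PySem.List.pyRange 0 N 1).map (fun i => first + i * M)
    else scanFirsts N M sieve rest

def solve_alt (N : Int) (M : Int) : List Int :=
  let tail := if 0 < M then (N - 1) * M else 0
  scanFirsts N M buildSieve (PySem.List.pyRange 1 (2000000 - tail + 1) 1)

-- ===== PRECONDITION & SPEC =====
-- Pre_ excludes exactly N ≤ 0, where A's max([]) raises ValueError.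
def Pre_solve (N : Int) (M : Int) : Prop := 1 ≤ N
instance (N : Int) (M : Int) : Decidable (Pre_solve N M) := by unfold Pre_solve; infer_instance
def pvWitness_solve : Int × Int := (3, 2)

def Spec_solve (N : Int) (M : Int) (out : List Int) : Prop := out = solve_alt N M
instance (N : Int) (M : Int) (out : List Int) : Decidable (Spec_solve N M out) := by unfold Spec_solve; infer_instance

-- ===== CLAIM (what is proved, stated in full; the proofs are below) =====
def Claim_equal_solve : Prop := ∀ (N : Int) (M : Int), Dom_solve N M → Pre_solve N M → Spec_solve N M (solve N M)

-- ===== LEMMAS AND PROOFS =====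

-- "n has no divisor d with 2 ≤ d and d² ≤ n" — the predicate both primality mechanisms decide.
def NoDiv (n : Int) : Prop := ∀ d : Int, 2 ≤ d → d * d ≤ n → ¬ d ∣ n

theorem noDiv_iff_prime (n : Int) (h2 : 2 ≤ n) : NoDiv n ↔ Nat.Prime n.toNat := by
  have hn : n = (n.toNat : Int) := by omega
  constructor
  · intro hnd
    by_contra hnp
    set m := n.toNat with hm
    have hm2 : 2 ≤ m := by omega
    have hrp : Nat.Prime m.minFac := Nat.minFac_prime (by omega)
    have hr2 : 2 ≤ m.minFac := hrp.two_le
    have hrd : m.minFac ∣ m := Nat.minFac_dvd m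
    have hrs : m.minFac ^ 2 ≤ m := Nat.minFac_sq_le_self (by omega) hnp
    refine hnd (m.minFac : Int) (by exact_mod_cast hr2) ?_ ?_
    · rw [hn]
      nlinarith [hrs]
    · rw [hn]; exact_mod_cast hrd
  · intro hp d hd hdd hdvd
    have hdn : d ≤ n := le_trans (le_mul_of_one_le_left (by omega) (by omega)) hdd
    have hdm : d.toNat ∣ n.toNat := by
      rw [← Int.natCast_dvd_natCast]
      simpa [Int.toNat_of_nonneg (by omega : (0:Int) ≤ d), ← hn] using hdvd
    rcases hp.eq_one_or_self_of_dvd d.toNat hdm with h1 | hs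
    · omega
    · have : d = n := by omega
      subst this
      nlinarith

theorem marked_iff (n P : Int) (h2 : 2 ≤ n) (hP0 : 0 < P) (hP : n < P * P) :
    (∀ p : Int, 2 ≤ p → p < P → NoDiv p → ¬(p ∣ n ∧ p * p ≤ n)) ↔ NoDiv n := by
  constructor
  · intro h
    by_contra hnd
    have hnp : ¬ Nat.Prime n.toNat := fun hp => hnd ((noDiv_iff_prime n h2).mpr hp)
    set m := n.toNat with hm
    have hn : n = (m : Int) := by omega
    have hrp : Nat.Prime m.minFac := Nat.minFac_prime (by omega)
    have hr2 : 2 ≤ m.minFac := hrp.two_le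
    have hrd : m.minFac ∣ m := Nat.minFac_dvd m
    have hrs : m.minFac ^ 2 ≤ m := Nat.minFac_sq_le_self (by omega) hnp
    set r : Int := (m.minFac : Int) with hr
    have hr2' : (2:Int) ≤ r := by rw [hr]; exact_mod_cast hr2
    have hrs' : r * r ≤ n := by rw [hn, hr]; nlinarith [hrs]
    have hrP : r < P := by nlinarith
    have hrnd : NoDiv r := by
      rw [noDiv_iff_prime r hr2']
      simpa [hr] using hrp
    exact h r hr2' hrP hrnd ⟨by rw [hn, hr]; exact_mod_cast hrd, hrs'⟩
  · intro hnd p hp hpP hndp ⟨hdvd, hsq⟩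
    exact hnd p hp hsq hdvd

-- Characterisation of A's 6k±1 wheel loop.
theorem isPrimeLoopA_eq (n : Int) (fuel : Nat) : ∀ (i : Int), 5 ≤ i → i % 6 = 5 → n < i + fuel →
    (isPrimeLoopA n i fuel = true ↔
      ∀ e : Int, i ≤ e →
        ((e % 6 = 5 ∧ e * e ≤ n) ∨ (e % 6 = 1 ∧ (e - 2) * (e - 2) ≤ n)) → ¬ e ∣ n) := by
  induction fuel with
  | zero =>
    intro i hi hm hf
    push_cast at hf
    simp only [isPrimeLoopA, true_iff]
    rintro e he (⟨hm5, hee⟩ | ⟨hm1, hee⟩) hdvd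
    · have h1 : e ≤ e * e := le_mul_of_one_le_left (by omega) (by omega)
      linarith
    · have he2 : i + 2 ≤ e := by omega
      have h2 : e - 2 ≤ (e - 2) * (e - 2) := le_mul_of_one_le_left (by omega) (by omega)
      linarith
  | succ fuel ih =>
    intro i hi hm hf
    simp only [isPrimeLoopA]
    by_cases hsq : i * i ≤ n
    · simp only [if_pos hsq]
      by_cases hda : (i:Int) ∣ n
      · rw [if_pos (by simp [(PySem.Int.mod_eq_zero_iff_dvd n i).mpr hda])]
        simp only [Bool.false_eq_true, false_iff]
        intro h
        exact h i le_rfl (Or.inl ⟨hm, hsq⟩) hda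
      · by_cases hdb : (i+2:Int) ∣ n
        · rw [if_pos (by simp [(PySem.Int.mod_eq_zero_iff_dvd n (i + 2)).mpr hdb])]
          simp only [Bool.false_eq_true, false_iff]
          intro h
          exact h (i+2) (by omega) (Or.inr ⟨by omega, by simpa using hsq⟩) hdb
        · rw [if_neg (by
            simp only [Bool.or_eq_true, beq_iff_eq, PySem.Int.mod_eq_zero_iff_dvd]
            exact fun hc => hc.elim hda hdb)]
          rw [ih (i+6) (by omega) (by omega) (by push_cast at hf ⊢; omega)]
          constructor
          · intro h e he hsh
            rcases lt_or_ge e (i+6) with hlt | hge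
            · rcases hsh with ⟨hm5, _⟩ | ⟨hm1, _⟩
              · have : e = i := by omega
                subst this; exact hda
              · have : e = i + 2 := by omega
                subst this; exact hdb
            · exact h e hge hsh
          · intro h e he hsh
            exact h e (by omega) hsh
    · simp only [if_neg hsq, true_iff]
      rintro e he (⟨hm5, hee⟩ | ⟨hm1, hee⟩) hdvd
      · have h1 : i * i ≤ e * e := mul_le_mul he he (by omega) (by omega)
        linarith
      · have he2 : i ≤ e - 2 := by omega
        have h1 : i * i ≤ (e - 2) * (e - 2) := mul_le_mul he2 he2 (by omega) (by omega)
        linarith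

-- Bridge: for n > 3 not divisible by 2 or 3, the wheel's divisor set decides the same predicate.
theorem wheel_bridge (n : Int) (h3 : 3 < n) (h2 : ¬ (2:Int) ∣ n) (h3' : ¬ (3:Int) ∣ n) :
    (∀ e : Int, 5 ≤ e →
        ((e % 6 = 5 ∧ e * e ≤ n) ∨ (e % 6 = 1 ∧ (e - 2) * (e - 2) ≤ n)) → ¬ e ∣ n) ↔
    (∀ e : Int, 2 ≤ e → e * e ≤ n → ¬ e ∣ n) := by
  constructor
  · intro h e he hee hdvd
    rcases (by omega : e % 6 = 0 ∨ e % 6 = 1 ∨ e % 6 = 2 ∨ e % 6 = 3 ∨ e % 6 = 4 ∨ e % 6 = 5) with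
      h0 | h1 | h0 | h1' | h0 | h5
    · exact h2 (dvd_trans (by omega) hdvd)
    · have he7 : 7 ≤ e := by omega
      have : (e - 2) * (e - 2) ≤ e * e := by nlinarith
      exact h e (by omega) (Or.inr ⟨h1, by linarith⟩) hdvd
    · exact h2 (dvd_trans (by omega) hdvd)
    · exact h3' (dvd_trans (by omega) hdvd)
    · exact h2 (dvd_trans (by omega) hdvd)
    · exact h e (by omega) (Or.inl ⟨h5, hee⟩) hdvd
  · intro h e he hsh hdvd
    rcases hsh with ⟨hm5, hee⟩ | ⟨hm1, hee⟩
    · exact h e (by omega) hee hdvd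
    · have he7 : 7 ≤ e := by omega
      rcases le_or_gt (e * e) n with hle | hgt
      · exact h e (by omega) hle hdvd
      · obtain ⟨c, hc⟩ := hdvd
        have hn0 : 0 < n := by linarith
        have hc0 : 0 < c := by
          by_contra hcn
          have : e * c ≤ 0 := mul_nonpos_of_nonneg_of_nonpos (by omega) (by omega)
          omega
        have hclt : c < e := by
          by_contra hcn
          have : e * e ≤ e * c := mul_le_mul_of_nonneg_left (by omega) (by omega)
          omega
        rcases eq_or_lt_of_le (by omega : (1:Int) ≤ c) with h1 | hc2
        · have : n = e := by rw [hc, ← h1, mul_one]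
          nlinarith
        · have hcc : c * c ≤ n := by nlinarith
          exact h c (by omega) hcc ⟨e, by linarith [hc, mul_comm e c]⟩

-- A's is_prime decides exactly NoDiv (for n ≥ 2).
theorem is_prime_char (n : Int) : is_prime n = true ↔ (2 ≤ n ∧ NoDiv n) := by
  by_cases hle : n ≤ 1
  · simp only [is_prime, if_pos hle]
    constructor
    · intro h; cases h
    · rintro ⟨h, -⟩; omega
  · by_cases h3 : n ≤ 3
    · have hnd : NoDiv n := by
        intro d hd hdd hdvd
        nlinarith
      simp only [is_prime, if_neg hle, if_pos h3]
      simp [hnd]; omega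
    · simp only [is_prime, if_neg hle, if_neg h3]
      by_cases hd : (PySem.Int.mod n 2 == 0 || PySem.Int.mod n 3 == 0) = true
      · rw [if_pos hd]
        have hdd : (2:Int) ∣ n ∨ (3:Int) ∣ n := by
          simpa [PySem.Int.mod_eq_zero_iff_dvd] using hd
        constructor
        · intro h; cases h
        · rintro ⟨-, hnd⟩
          by_cases h2' : (2:Int) ∣ n
          · exact (hnd 2 (by omega) (by omega) h2').elim
          · have h3' : (3:Int) ∣ n := hdd.resolve_left h2'
            have h9 : (9:Int) ≤ n := by omega
            exact (hnd 3 (by omega) (by omega) h3').elim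
      · rw [if_neg hd]
        have hdd : ¬ (2:Int) ∣ n ∧ ¬ (3:Int) ∣ n := by
          rw [← PySem.Int.mod_eq_zero_iff_dvd, ← PySem.Int.mod_eq_zero_iff_dvd]
          simpa using hd
        rw [isPrimeLoopA_eq n n.toNat 5 (by omega) (by omega) (by omega),
            wheel_bridge n (by omega) hdd.1 hdd.2]
        unfold NoDiv
        constructor
        · intro h; exact ⟨by omega, h⟩
        · exact fun h => h.2

-- get! through the marking fold: an index is set to false iff it is in the range list.
theorem getBang_set_self (a : Array Bool) (i : Nat) (v : Bool) (h : i < a.size) :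
    (a.set! i v)[i]! = v := by
  simp [Array.set!, h]

theorem getBang_set_ne (a : Array Bool) (i j : Nat) (v : Bool) (h : i ≠ j) :
    (a.set! i v)[j]! = a[j]! := by
  by_cases hj : j < a.size
  · rw [Array.getElem!_eq_getD, Array.getD, Array.getElem!_eq_getD, Array.getD]
    simp [Array.set!, hj, h]
  · rw [Array.getElem!_eq_getD, Array.getD, Array.getElem!_eq_getD, Array.getD]
    simp [Array.set!, hj]

theorem foldl_set_getBang (qs : List Int) : ∀ (s : Array Bool) (m : Nat), m < s.size →
    (∀ q ∈ qs, 0 ≤ q) →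
    (qs.foldl (fun s q => s.set! q.toNat false) s)[m]! =
      if (m : Int) ∈ qs then false else s[m]! := by
  induction qs with
  | nil => intro s m hm hq; simp
  | cons q qs ih =>
    intro s m hm hq
    simp only [List.foldl_cons]
    rw [ih (s.set! q.toNat false) m (by simpa [Array.size_set!] using hm)
          (fun q' hq' => hq q' (List.mem_cons_of_mem _ hq'))]
    have hq0 : 0 ≤ q := hq q List.mem_cons_self
    by_cases hmem : (m:Int) ∈ qs
    · simp [hmem, List.mem_cons]
    · by_cases hqm : q = (m:Int)
      · have hqn : q.toNat = m := by omega
        rw [if_neg hmem, if_pos (by simp [List.mem_cons, hqm]), hqn,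
            getBang_set_self s m false hm]
      · have hne : q.toNat ≠ m := by omega
        rw [if_neg hmem, if_neg (by simp [List.mem_cons]; exact ⟨fun h => hqm h.symm, hmem⟩),
            getBang_set_ne s q.toNat m false hne]

theorem foldl_set_size (qs : List Int) : ∀ (s : Array Bool),
    (qs.foldl (fun s q => s.set! q.toNat false) s).size = s.size := by
  induction qs with
  | nil => intro s; rfl
  | cons q qs ih => intro s; simp only [List.foldl_cons, ih, Array.size_set!]

-- Invariant of the sieve loop: after processing the primes below P, an entry n ≤ LIMIT is
-- still true iff n ≥ 2 and no prime p < P divides n with p² ≤ n.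
def Good (P : Int) (s : Array Bool) : Prop :=
  s.size = 2000001 ∧ ∀ n : Int, 0 ≤ n → n ≤ 2000000 →
    (s[n.toNat]! = true ↔
      (2 ≤ n ∧ ∀ p : Int, 2 ≤ p → p < P → NoDiv p → ¬(p ∣ n ∧ p * p ≤ n)))

theorem mark_get (p : Int) (hp : 2 ≤ p) (s : Array Bool) (hsz : s.size = 2000001)
    (n : Int) (h0 : 0 ≤ n) (h1 : n ≤ 2000000) :
    (markMultiples 2000000 p s)[n.toNat]! =
      if p ∣ n ∧ p * p ≤ n then false else s[n.toNat]! := by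
  unfold markMultiples
  have hq0 : ∀ q ∈ PySem.List.pyRange (p * p) (2000000 + 1) p, 0 ≤ q := by
    intro q hq
    rw [PySem.List.mem_pyRange_iff_of_pos (by omega)] at hq
    nlinarith [hq.1]
  rw [foldl_set_getBang _ s n.toNat (by omega) hq0]
  have hcast : ((n.toNat : Int)) = n := by omega
  have hmem : ((n.toNat : Int) ∈ PySem.List.pyRange (p * p) (2000000 + 1) p) ↔
      (p ∣ n ∧ p * p ≤ n) := by
    rw [PySem.List.mem_pyRange_iff_of_pos (by omega), hcast]
    constructor
    · rintro ⟨hlo, -, hdv⟩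
      exact ⟨(dvd_sub_left (dvd_mul_right p p)).mp hdv, hlo⟩
    · rintro ⟨hdv, hlo⟩
      exact ⟨hlo, by omega, (dvd_sub_left (dvd_mul_right p p)).mpr hdv⟩
  by_cases hc : p ∣ n ∧ p * p ≤ n
  · rw [if_pos (hmem.mpr hc), if_pos hc]
  · rw [if_neg (fun h => hc (hmem.mp h)), if_neg hc]

theorem good_final (p : Int) (s : Array Bool) (hg : Good p s) (hpp : 2000000 < p * p)
    (hp0 : 0 < p) (n : Int) (h0 : 0 ≤ n) (h1 : n ≤ 2000000) :
    (s[n.toNat]! = true ↔ (2 ≤ n ∧ NoDiv n)) := by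
  rw [hg.2 n h0 h1]
  by_cases h2 : 2 ≤ n
  · exact and_congr_right fun _ => marked_iff n p h2 hp0 (by omega)
  · simp [h2]

theorem sieveLoop_good : ∀ (fuel : Nat) (p : Int) (s : Array Bool), 2 ≤ p → Good p s →
    (2000000 : Int) < p + fuel →
    ∀ n : Int, 0 ≤ n → n ≤ 2000000 →
      ((sieveLoop 2000000 p s fuel)[n.toNat]! = true ↔ (2 ≤ n ∧ NoDiv n)) := by
  intro fuel
  induction fuel with
  | zero =>
    intro p s hp hg hf n h0 h1
    simp only [sieveLoop]
    have hpl : (2000000:Int) < p := by push_cast at hf; omega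
    exact good_final p s hg (by nlinarith) (by omega) n h0 h1
  | succ fuel ih =>
    intro p s hp hg hf n h0 h1
    simp only [sieveLoop]
    by_cases hc : p * p ≤ 2000000
    · rw [if_pos hc]
      have hple : p ≤ 2000000 := by nlinarith
      have hsp : s[p.toNat]! = true ↔ NoDiv p := by
        rw [hg.2 p (by omega) hple]
        constructor
        · rintro ⟨h2p, hcond⟩
          exact (marked_iff p p h2p (by omega) (by nlinarith)).mp hcond
        · intro hnd
          exact ⟨hp, (marked_iff p p hp (by omega) (by nlinarith)).mpr hnd⟩
      have hgood : Good (p+1) (if s[p.toNat]! then markMultiples 2000000 p s else s) := by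
        by_cases hb : s[p.toNat]! = true
        · rw [if_pos hb]
          have hnd : NoDiv p := hsp.mp hb
          refine ⟨by rw [show (markMultiples 2000000 p s).size = s.size from foldl_set_size _ s]; exact hg.1, ?_⟩
          intro n' h0' h1'
          rw [mark_get p hp s hg.1 n' h0' h1']
          by_cases hd : p ∣ n' ∧ p * p ≤ n'
          · rw [if_pos hd]
            constructor
            · intro h; cases h
            · rintro ⟨h2, hcond⟩
              exact (hcond p hp (by omega) hnd hd).elim
          · rw [if_neg hd, hg.2 n' h0' h1']
            refine and_congr_right fun h2 => ?_
            constructor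
            · intro hcond p' hp' hplt hnd' hdd'
              rcases lt_or_ge p' p with h | h
              · exact hcond p' hp' h hnd' hdd'
              · have : p' = p := by omega
                subst this; exact hd hdd'
            · intro hcond p' hp' hplt hnd'
              exact hcond p' hp' (by omega) hnd'
        · rw [if_neg hb]
          have hnd : ¬ NoDiv p := fun h => hb (hsp.mpr h)
          refine ⟨hg.1, ?_⟩
          intro n' h0' h1'
          rw [hg.2 n' h0' h1']
          refine and_congr_right fun h2 => ?_
          constructor
          · intro hcond p' hp' hplt hnd' hdd'
            rcases lt_or_ge p' p with h | h
            · exact hcond p' hp' h hnd' hdd'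
            · have : p' = p := by omega
              subst this; exact (hnd hnd').elim
          · intro hcond p' hp' hplt hnd'
            exact hcond p' hp' (by omega) hnd'
      exact ih (p+1) _ (by omega) hgood (by push_cast at hf ⊢; omega) n h0 h1
    · rw [if_neg hc]
      exact good_final p s hg (by omega) (by omega) n h0 h1

theorem good_init : Good 2 (((Array.replicate 2000001 true).set! 0 false).set! 1 false) := by
  refine ⟨by simp, ?_⟩
  intro n h0 h1
  by_cases h2 : 2 ≤ n
  · rw [getBang_set_ne _ 1 n.toNat false (by omega),
        getBang_set_ne _ 0 n.toNat false (by omega)]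
    have hlt : n.toNat < 2000001 := by omega
    have hrep : (Array.replicate 2000001 true)[n.toNat]! = true := by simp [hlt]
    rw [hrep]
    exact ⟨fun _ => ⟨h2, fun p hp hplt _ _ => by omega⟩, fun _ => rfl⟩
  · have hrhs : ¬ (2 ≤ n ∧ ∀ p : Int, 2 ≤ p → p < 2 → NoDiv p → ¬(p ∣ n ∧ p * p ≤ n)) := by
      rintro ⟨h, -⟩; exact h2 h
    simp only [hrhs, iff_false]
    rcases (by omega : n = 0 ∨ n = 1) with rfl | rfl
    · rw [show ((0:Int)).toNat = 0 from rfl, getBang_set_ne _ 1 0 false (by omega),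
        getBang_set_self _ 0 false (by simp)]
      simp
    · rw [show ((1:Int)).toNat = 1 from rfl, getBang_set_self _ 1 false (by simp)]
      simp

theorem sieve_correct (n : Int) (h0 : 0 ≤ n) (h1 : n ≤ 2000000) :
    (buildSieve[n.toNat]! = true ↔ (2 ≤ n ∧ NoDiv n)) := by
  exact sieveLoop_good 2000000 2 _ (by norm_num) good_init (by norm_num) n h0 h1

-- max(sequence) = first + tail.
theorem max_seq (N M first : Int) (hN : 1 ≤ N) :
    PySem.List.max? ((PySem.List.pyRange 0 N 1).map (fun i => first + i * M)) (fun y => y)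
      = some (first + (if 0 < M then (N - 1) * M else 0)) := by
  set f : Int → Int := fun i => first + i * M with hf
  set seq := (PySem.List.pyRange 0 N 1).map f with hseq
  set m := first + (if 0 < M then (N - 1) * M else 0) with hm
  have hmem : m ∈ seq := by
    have : m = f (if 0 < M then N - 1 else 0) := by
      by_cases h : 0 < M <;> simp [hf, hm, h]
    rw [this]
    exact List.mem_map_of_mem (by
      rw [PySem.List.mem_pyRange_one]
      by_cases h : 0 < M <;> simp [h] <;> omega)
  have hbd : ∀ y ∈ seq, y ≤ m := by
    intro y hy
    obtain ⟨i, hi, rfl⟩ := List.mem_map.mp hy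
    rw [PySem.List.mem_pyRange_one] at hi
    simp only [hf, hm]
    by_cases h : 0 < M
    · simp only [if_pos h]
      have : i * M ≤ (N - 1) * M := mul_le_mul_of_nonneg_right (by omega) (by omega)
      omega
    · simp only [if_neg h]
      have : i * M ≤ 0 := mul_nonpos_of_nonneg_of_nonpos (by omega) (by omega)
      omega
  cases hmax : PySem.List.max? seq (fun y => y) with
  | none =>
    rw [PySem.List.max?_eq_none_iff] at hmax
    rw [hmax] at hmem
    exact absurd hmem (List.not_mem_nil)
  | some mx =>
    have h1 : mx ∈ seq := PySem.List.max?_mem hmax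
    have h2 := PySem.List.max?_isMax hmax m hmem
    exact congrArg some (le_antisymm (hbd mx h1) h2).symm ▸ rfl

theorem loop_eq (N M : Int) (hN : 1 ≤ N) : ∀ (fuel : Nat) (first : Int), 1 ≤ first →
    2000001 ≤ first + fuel →
    solveLoopA N M first fuel
      = scanFirsts N M buildSieve
          (PySem.List.pyRange first (2000000 - (if 0 < M then (N - 1) * M else 0) + 1) 1) := by
  have hT0 : 0 ≤ (if 0 < M then (N - 1) * M else 0) := by
    by_cases h : 0 < M
    · simp only [if_pos h]
      exact mul_nonneg (by omega) (by omega)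
    · simp [h]
  set T : Int := if 0 < M then (N - 1) * M else 0 with hT
  intro fuel
  induction fuel with
  | zero =>
    intro first h1 hf
    simp only [solveLoopA]
    rw [PySem.List.pyRange_one_eq_nil (by omega)]
    rfl
  | succ fuel ih =>
    intro first h1 hf
    simp only [solveLoopA]
    rw [max_seq N M first hN, ← hT]
    simp only []
    by_cases hm : 2000000 < first + T
    · rw [if_pos hm, PySem.List.pyRange_one_eq_nil (by omega)]
      rfl
    · rw [if_neg hm]
      conv_rhs => rw [PySem.List.pyRange_one_cons (a := first) (by omega)]
      simp only [scanFirsts]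
      have hterm : ∀ i ∈ PySem.List.pyRange 0 N 1,
          (decide (first + i * M < 2) || !(buildSieve[(first + i * M).toNat]!))
            = ! is_prime (first + i * M) := by
        intro i hi
        rw [PySem.List.mem_pyRange_one] at hi
        set t := first + i * M with ht
        have htle : t ≤ first + T := by
          rw [ht, hT]
          by_cases h : 0 < M
          · simp only [if_pos h]
            have : i * M ≤ (N - 1) * M := mul_le_mul_of_nonneg_right (by omega) (by omega)
            omega
          · simp only [if_neg h]
            have : i * M ≤ 0 := mul_nonpos_of_nonneg_of_nonpos (by omega) (by omega)
            omega
        by_cases h2 : t < 2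
        · have hpf : is_prime t = false := by
            unfold is_prime
            rw [if_pos (by omega)]
          simp [h2, hpf]
        · have heq : buildSieve[t.toNat]! = is_prime t := by
            rw [Bool.eq_iff_iff, sieve_correct t (by omega) (by omega), is_prime_char t]
          simp [h2, heq]
      have hall : ((PySem.List.pyRange 0 N 1).all
            (fun i => decide (first + i * M < 2) || !(buildSieve[(first + i * M).toNat]!)))
          = ! (((PySem.List.pyRange 0 N 1).map (fun i => first + i * M)).any
                (fun num => is_prime num)) := by
        rw [List.any_map, List.all_eq_not_any_not,
            PySem.List.any_congr_mem (fun i hi => by rw [hterm i hi, Bool.not_not])]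
        rfl
      rw [hall]
      by_cases hany : (((PySem.List.pyRange 0 N 1).map (fun i => first + i * M)).any
          (fun num => is_prime num)) = true
      · rw [if_pos hany, hany]
        simp only [Bool.not_true, Bool.false_eq_true, if_false]
        exact ih (first + 1) (by omega) (by push_cast at hf ⊢; omega)
      · rw [if_neg hany]
        rw [Bool.eq_false_iff.mpr hany]
        simp only [Bool.not_false, if_true]

-- ===== VERDICT (by name: the statement is the Claim_ definition above) =====
theorem solve_spec : Claim_equal_solve := by
  intro N M _ hPre
  unfold Spec_solve solve solve_alt
  exact loop_eq N M hPre 2000001 1 (by norm_num) (by norm_num)
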